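-- pv_equiv track=rewrite | github.com/sonnbeom/SWEA | TIL/October/3rd_week/프로그래머스_불량사용자.py | is_black_user
-- ===== SOURCE A (Python) =====
-- def is_black_user(users, ban_id):
--     res_user_list = []
--     for user in users:
--
--         if len(user) != len(ban_id):
--             continue
--         check = 0
--         temp_user = user
--         for i in range(len(user)):
--             if ban_id[i] == "*":
--                 continue
--             elif ban_id[i] != user[i]:
--                 check += 1
--                 break
--         if check == 0:
--             res_user_list.append(temp_user)
--     return res_user_list
-- ===== SOURCE B (Python) =====
-- def is_black_user(users, ban_id):
--     # Recursive simultaneous matcher: consume one char of user and pattern at a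
--     # time; '*' matches any single char; both strings must end together, so the
--     # length requirement is handled implicitly by the recursion.
--     def ok(u, p):
--         if not u or not p:
--             return not u and not p
--         return (p[0] == "*" or p[0] == u[0]) and ok(u[1:], p[1:])
--     return [user for user in users if ok(user, ban_id)]
-- ===== Notes on version B (the rewrite author's own statement) =====
-- stated objective: simpler
-- what changed: B replaces A's explicit length check plus index loop with a mismatch counter and break by a recursive simultaneous matcher that consumes one character of user and pattern at a time ('*' matches any char, both strings must end together), filtering users with a comprehension.
import Mathlib
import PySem

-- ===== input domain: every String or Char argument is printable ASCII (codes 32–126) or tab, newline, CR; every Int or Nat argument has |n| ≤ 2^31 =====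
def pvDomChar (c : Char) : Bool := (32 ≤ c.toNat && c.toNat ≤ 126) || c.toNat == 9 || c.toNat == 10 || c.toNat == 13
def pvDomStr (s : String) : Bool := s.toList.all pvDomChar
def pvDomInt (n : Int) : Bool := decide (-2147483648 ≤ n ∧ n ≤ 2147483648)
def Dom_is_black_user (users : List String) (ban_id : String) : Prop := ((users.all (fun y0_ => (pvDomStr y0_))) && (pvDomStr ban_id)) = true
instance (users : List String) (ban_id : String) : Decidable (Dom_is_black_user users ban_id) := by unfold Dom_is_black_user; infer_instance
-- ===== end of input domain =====

-- B (simpler): a recursive simultaneous matcher consuming one char of user and pattern at a time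
-- ('*' matches any single char; both strings must end together), replacing A's length check +
-- index loop with a mismatch counter and break.


-- ===== PORT A =====
-- inner loop of A: i walks 0..len(user)-1, '*' and matching chars continue, a mismatch
-- sets check = 1 and breaks; returns the final value of `check`.
def pvAGo (user ban : List Char) (i : Nat) : Nat :=
  if _h : i < user.length then
    if ban.getD i ' ' = '*' then pvAGo user ban (i + 1)
    else if ban.getD i ' ' ≠ user.getD i ' ' then 1
    else pvAGo user ban (i + 1)
  else 0
termination_by user.length - i

def is_black_user (users : List String) (ban_id : String) : List String :=
  users.foldl
    (fun res_user_list user =>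
      if user.toList.length ≠ ban_id.toList.length then res_user_list
      else if pvAGo user.toList ban_id.toList 0 = 0 then res_user_list ++ [user]
      else res_user_list)
    []

-- ===== PORT B =====
-- B's helper ok(u, p): if not u or not p: return not u and not p;
-- else (p[0] == '*' or p[0] == u[0]) and ok(u[1:], p[1:])
def pvOk : List Char → List Char → Bool
  | [], [] => true
  | [], _ :: _ => false
  | _ :: _, [] => false
  | a :: us, b :: ps => (b == '*' || b == a) && pvOk us ps

def is_black_user_alt (users : List String) (ban_id : String) : List String :=
  users.filter (fun user => pvOk user.toList ban_id.toList)

-- ===== PRECONDITION & SPEC =====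
-- (A is total: no Pre_)
def Spec_is_black_user (users : List String) (ban_id : String) (out : List String) : Prop := out = is_black_user_alt users ban_id
instance (users : List String) (ban_id : String) (out : List String) : Decidable (Spec_is_black_user users ban_id out) := by unfold Spec_is_black_user; infer_instance

-- ===== CLAIM (what is proved, stated in full; the proofs are below) =====
def Claim_equal_is_black_user : Prop := ∀ (users : List String) (ban_id : String), Dom_is_black_user users ban_id → Spec_is_black_user users ban_id (is_black_user users ban_id)

-- ===== LEMMAS AND PROOFS =====

-- A's inner loop returns 0 iff every position from i on is '*' or matches.
lemma pvAGo_eq_zero_iff (user ban : List Char) (i : Nat) :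
    pvAGo user ban i = 0 ↔
      ∀ j, i ≤ j → j < user.length → ban.getD j ' ' ≠ '*' → user.getD j ' ' = ban.getD j ' ' := by
  fun_induction pvAGo user ban i with
  | case1 i h hstar ih =>
    rw [ih]
    constructor
    · intro H j hij hj hb
      rcases Nat.eq_or_lt_of_le hij with rfl | hij'
      · exact absurd hstar hb
      · exact H j hij' hj hb
    · intro H j hij hj hb
      exact H j (Nat.le_of_succ_le hij) hj hb
  | case2 i h hstar hne =>
    simp only [Nat.one_ne_zero, false_iff, not_forall]
    exact ⟨i, Nat.le_refl i, h, hstar, fun hc => hne (hc.symm)⟩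
  | case3 i h hstar heq ih =>
    rw [ih]
    constructor
    · intro H j hij hj hb
      rcases Nat.eq_or_lt_of_le hij with rfl | hij'
      · exact (not_not.mp heq).symm
      · exact H j hij' hj hb
    · intro H j hij hj hb
      exact H j (Nat.le_of_succ_le hij) hj hb
  | case4 i h =>
    constructor
    · intro _ j hij hj _
      omega
    · intro _
      rfl

-- B's recursive matcher characterised: equal lengths plus per-position agreement off the stars.
lemma pvOk_iff (u p : List Char) :
    pvOk u p = true ↔
      (u.length = p.length ∧
       ∀ j, j < u.length → p.getD j ' ' ≠ '*' → u.getD j ' ' = p.getD j ' ') := by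
  induction u generalizing p with
  | nil => cases p <;> simp [pvOk]
  | cons a us ih =>
    cases p with
    | nil => simp [pvOk]
    | cons b ps =>
      simp only [pvOk, Bool.and_eq_true, Bool.or_eq_true, beq_iff_eq, ih, List.length_cons]
      constructor
      · rintro ⟨hb, hlen, H⟩
        refine ⟨by omega, ?_⟩
        intro j hj hstar
        cases j with
        | zero =>
          simp only [List.getD_cons_zero] at hstar ⊢
          rcases hb with hb | hb
          · exact absurd hb hstar
          · exact hb.symm
        | succ k =>
          simp only [List.getD_cons_succ] at hstar ⊢
          exact H k (by omega) hstar
      · rintro ⟨hlen, H⟩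
        refine ⟨?_, by omega, ?_⟩
        · by_cases hb : b = '*'
          · exact Or.inl hb
          · right
            have := H 0 (by omega) (by simpa using hb)
            simpa using this.symm
        · intro k hk hstar
          have := H (k + 1) (by omega) (by simpa using hstar)
          simpa using this

-- the pointwise agreement of the two per-user tests
lemma pred_agree (ban : List Char) (u : String) :
    (if u.toList.length ≠ ban.length then false
     else if pvAGo u.toList ban 0 = 0 then true else false) = pvOk u.toList ban := by
  by_cases hlen : u.toList.length = ban.length
  · by_cases hgo : pvAGo u.toList ban 0 = 0
    · rw [if_neg (by simpa using hlen), if_pos hgo]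
      symm
      rw [pvOk_iff]
      exact ⟨hlen, fun j hj => (pvAGo_eq_zero_iff u.toList ban 0).mp hgo j (Nat.zero_le _) hj⟩
    · rw [if_neg (by simpa using hlen), if_neg hgo]
      symm
      rw [Bool.eq_false_iff, ne_eq, pvOk_iff]
      rintro ⟨_, H⟩
      exact hgo ((pvAGo_eq_zero_iff u.toList ban 0).mpr (fun j _ => H j))
  · rw [if_pos (by simpa using hlen)]
    symm
    rw [Bool.eq_false_iff, ne_eq, pvOk_iff]
    rintro ⟨h, _⟩
    exact hlen h

-- the append-accumulator fold is a filter
lemma fold_eq_filter (ban : List Char) (users : List String) (acc : List String) :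
    users.foldl
      (fun res user =>
        if user.toList.length ≠ ban.length then res
        else if pvAGo user.toList ban 0 = 0 then res ++ [user]
        else res) acc =
    acc ++ users.filter (fun u => pvOk u.toList ban) := by
  induction users generalizing acc with
  | nil => simp
  | cons u us ih =>
    simp only [List.foldl_cons, List.filter_cons]
    have h := pred_agree ban u
    by_cases h1 : u.toList.length = ban.length
    · by_cases h2 : pvAGo u.toList ban 0 = 0
      · rw [if_neg (by simpa using h1), if_pos h2, ih,
          if_pos (show _ = true by rw [← h]; simp [h1, h2])]
        simp
      · rw [if_neg (by simpa using h1), if_neg h2, ih,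
          if_neg (show ¬ _ = true by rw [← h]; simp [h1, h2])]
    · rw [if_pos (by simpa using h1), ih,
        if_neg (show ¬ _ = true by rw [← h, if_pos h1]; simp)]

-- ===== VERDICT (by name: the statement is the Claim_ definition above) =====
theorem is_black_user_spec : Claim_equal_is_black_user := by
  intro users ban_id _
  unfold Spec_is_black_user is_black_user is_black_user_alt
  simpa using fold_eq_filter ban_id.toList users []
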